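-- pv_equiv track=rewrite | github.com/rgoldsteingoldfox/cre-research-assistant | utils/contact_ranking.py | _is_commercial_zoning
-- ===== SOURCE A (Python) =====
-- def _is_commercial_zoning(zoning):
--     """Check if zoning code indicates a commercial/office/industrial property."""
--     if not zoning:
--         return False
--     zoning_upper = zoning.upper().strip()
--     # Common commercial zoning prefixes
--     commercial_prefixes = [
--         "C", "C-", "C1", "C2", "C3", "C4", "C5",
--         "O", "O-", "O1", "O2",  # Office
--         "M", "M-", "M1", "M2",  # Mixed-use / Industrial
--         "I", "I-", "I1", "I2",  # Industrial
--         "B", "B-", "B1", "B2",  # Business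
--         "MU",  # Mixed-use
--         "CG", "CL", "CC",  # Commercial general/local/community
--     ]
--     for prefix in commercial_prefixes:
--         if zoning_upper.startswith(prefix):
--             return True
--     # Also check description keywords
--     commercial_keywords = ["commercial", "office", "industrial", "business", "mixed"]
--     zoning_lower = zoning.lower()
--     return any(kw in zoning_lower for kw in commercial_keywords)
-- ===== SOURCE B (Python) =====
-- def _is_commercial_zoning(zoning):
--     """Check if zoning code indicates a commercial/office/industrial property."""
--     if not zoning:
--         return False
--     zu = zoning.upper().strip()
--     # Every prefix in A's list begins with one of these letters, and each
--     # single letter is itself a prefix, so the whole scan collapses to a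
--     # one-character test ([:1] so an all-whitespace zoning just misses).
--     if zu[:1] in {"C", "O", "M", "I", "B"}:
--         return True
--     zoning_lower = zoning.lower()
--     return any(kw in zoning_lower for kw in ["commercial", "office", "industrial", "business", "mixed"])
-- ===== Notes on version B (the rewrite author's own statement) =====
-- stated objective: simpler
-- what changed: The 27-element startswith scan is collapsed to a single first-character membership test (every prefix in A's list begins with one of C/O/M/I/B, each of which is itself in the list); the keyword fallback is unchanged.
import Mathlib
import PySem

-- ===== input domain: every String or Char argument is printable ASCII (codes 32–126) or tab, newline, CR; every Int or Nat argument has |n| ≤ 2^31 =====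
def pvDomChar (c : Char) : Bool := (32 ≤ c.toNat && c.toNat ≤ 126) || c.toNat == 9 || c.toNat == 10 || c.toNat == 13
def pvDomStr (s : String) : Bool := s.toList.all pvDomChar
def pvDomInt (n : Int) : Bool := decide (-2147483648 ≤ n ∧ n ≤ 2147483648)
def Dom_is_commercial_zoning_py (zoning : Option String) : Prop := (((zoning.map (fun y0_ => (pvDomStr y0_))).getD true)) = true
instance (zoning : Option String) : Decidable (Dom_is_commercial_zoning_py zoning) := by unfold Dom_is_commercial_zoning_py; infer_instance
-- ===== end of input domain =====

-- B collapses A's 27-prefix startswith scan into a single first-character membership test; keyword fallback unchanged (simpler).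


-- ===== PORT A =====
def pvPrefixesA : List String :=
  ["C", "C-", "C1", "C2", "C3", "C4", "C5",
   "O", "O-", "O1", "O2",
   "M", "M-", "M1", "M2",
   "I", "I-", "I1", "I2",
   "B", "B-", "B1", "B2",
   "MU",
   "CG", "CL", "CC"]

def pvKeywords : List String := ["commercial", "office", "industrial", "business", "mixed"]

def is_commercial_zoning_py (zoning : Option String) : Bool :=
  match zoning with
  | none => false
  | some z =>
    if z = "" then false
    else
      let zoning_upper := PySem.Str.strip (PySem.Str.upper z)
      -- for prefix in commercial_prefixes: if zoning_upper.startswith(prefix): return True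
      if pvPrefixesA.any (fun p => PySem.Str.startswith zoning_upper p) then true
      else
        let zoning_lower := PySem.Str.lower z
        pvKeywords.any (fun kw => PySem.Str.isIn kw zoning_lower)

-- ===== PORT B =====
def is_commercial_zoning_py_alt (zoning : Option String) : Bool :=
  match zoning with
  | none => false
  | some z =>
    if z = "" then false
    else
      let zu := PySem.Str.strip (PySem.Str.upper z)
      if ["C", "O", "M", "I", "B"].contains (PySem.Str.slice zu none (some 1)) then true
      else
        let zoning_lower := PySem.Str.lower z
        pvKeywords.any (fun kw => PySem.Str.isIn kw zoning_lower)

-- ===== PRECONDITION & SPEC =====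
def Spec_is_commercial_zoning_py (zoning : Option String) (out : Bool) : Prop := out = is_commercial_zoning_py_alt zoning
instance (zoning : Option String) (out : Bool) : Decidable (Spec_is_commercial_zoning_py zoning out) := by unfold Spec_is_commercial_zoning_py; infer_instance

-- ===== CLAIM (what is proved, stated in full; the proofs are below) =====
def Claim_equal_is_commercial_zoning_py : Prop := ∀ (zoning : Option String), Dom_is_commercial_zoning_py zoning → Spec_is_commercial_zoning_py zoning (is_commercial_zoning_py zoning)

-- ===== LEMMAS AND PROOFS =====


-- A's whole prefix scan, at the character-list level, is a first-character test
lemma pv_chars_key (l : List Char) :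
    (pvPrefixesA.any fun p => PySem.Chars.startswith l p.toList)
      = [['C'], ['O'], ['M'], ['I'], ['B']].contains (l.take 1) := by
  rcases l with _ | ⟨c, t⟩
  · decide
  · simp [pvPrefixesA, PySem.Chars.startswith, List.isPrefixOf]
    by_cases hC : c = 'C'
    · simp [hC]
    by_cases hO : c = 'O'
    · simp [hO]
    by_cases hM : c = 'M'
    · simp [hM]
    by_cases hI : c = 'I'
    · simp [hI]
    by_cases hB : c = 'B'
    · simp [hB]
    have hC' : ¬('C' = c) := fun h => hC h.symm
    have hO' : ¬('O' = c) := fun h => hO h.symm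
    have hM' : ¬('M' = c) := fun h => hM h.symm
    have hI' : ¬('I' = c) := fun h => hI h.symm
    have hB' : ¬('B' = c) := fun h => hB h.symm
    simp [hC, hO, hM, hI, hB, hC', hO', hM', hI', hB']

lemma any_prefix_eq_first_char (zu : String) :
    (pvPrefixesA.any fun p => PySem.Str.startswith zu p)
      = ["C", "O", "M", "I", "B"].contains (PySem.Str.slice zu none (some 1)) := by
  have hL : (pvPrefixesA.any fun p => PySem.Str.startswith zu p)
      = pvPrefixesA.any fun p => PySem.Chars.startswith zu.toList p.toList := by
    simp [PySem.Str.startswith_eq]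
  have hslice : (PySem.Str.slice zu none (some 1)).toList = zu.toList.take 1 := by
    simp [PySem.Str.toList_slice, PySem.List.slice_to zu.toList (b := 1) (by norm_num)]
  have hs2 : ∀ (s t : String), (s = t) ↔ (s.toList = t.toList) :=
    fun s t => ⟨fun h => h ▸ rfl, String.ext⟩
  have hR : (["C", "O", "M", "I", "B"].contains (PySem.Str.slice zu none (some 1)))
      = ([['C'], ['O'], ['M'], ['I'], ['B']].contains (zu.toList.take 1)) := by
    have e1 : ("C" : String).toList = ['C'] := rfl
    have e2 : ("O" : String).toList = ['O'] := rfl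
    have e3 : ("M" : String).toList = ['M'] := rfl
    have e4 : ("I" : String).toList = ['I'] := rfl
    have e5 : ("B" : String).toList = ['B'] := rfl
    simp [hs2, hslice, e1, e2, e3, e4, e5]
  rw [hL, hR]
  exact pv_chars_key zu.toList

-- ===== VERDICT (by name: the statement is the Claim_ definition above) =====
theorem is_commercial_zoning_py_spec : Claim_equal_is_commercial_zoning_py := by
  intro zoning _
  unfold Spec_is_commercial_zoning_py is_commercial_zoning_py is_commercial_zoning_py_alt
  cases zoning with
  | none => rfl
  | some z => simp only [any_prefix_eq_first_char]
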